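-- pv_equiv track=rewrite | github.com/AmirHoseinSafari/LRCN-drug-resistance | feature_importance/base_approach.py | find_the_portion
-- ===== SOURCE A (Python) =====
-- def find_the_portion(imp_index, feature_index):
--     intersect = []
--     for i in range(0, len(imp_index)):
--         for j in range(0, len(feature_index)):
--             if feature_index[j] + 2 >= imp_index[i] >= feature_index[j] - 2:
--                 intersect.append(feature_index[j])
--                 break
--
--     return intersect
-- ===== SOURCE B (Python) =====
-- def find_the_portion(imp_index, feature_index):
--     first = {}
--     for j, v in enumerate(feature_index):
--         if v not in first:
--             first[v] = j
--     intersect = []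
--     for x in imp_index:
--         best = None
--         for v in (x - 2, x - 1, x, x + 1, x + 2):
--             j = first.get(v)
--             if j is not None and (best is None or j < best[0]):
--                 best = (j, v)
--         if best is not None:
--             intersect.append(best[1])
--     return intersect
-- ===== Notes on version B (the rewrite author's own statement) =====
-- stated objective: faster
-- what changed: Replaces the inner linear scan of feature_index per query with a value->earliest-index dict built once; each query checks the 5 integer values in [x-2,x+2] and takes the one with smallest position.
import Mathlib
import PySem

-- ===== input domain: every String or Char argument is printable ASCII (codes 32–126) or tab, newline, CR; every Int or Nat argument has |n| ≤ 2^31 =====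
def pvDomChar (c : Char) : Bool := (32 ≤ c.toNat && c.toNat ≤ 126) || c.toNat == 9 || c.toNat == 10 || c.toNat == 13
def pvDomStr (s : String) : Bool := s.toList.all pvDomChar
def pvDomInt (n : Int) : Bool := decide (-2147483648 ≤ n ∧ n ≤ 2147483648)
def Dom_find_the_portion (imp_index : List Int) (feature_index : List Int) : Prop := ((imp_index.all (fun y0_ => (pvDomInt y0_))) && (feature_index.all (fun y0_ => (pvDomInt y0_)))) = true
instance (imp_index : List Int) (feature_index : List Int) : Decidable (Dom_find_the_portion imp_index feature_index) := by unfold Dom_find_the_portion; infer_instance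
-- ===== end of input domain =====

-- B replaces A's inner linear scan per query with a value→earliest-index dict built once;
-- each query checks the 5 integer values in [x-2, x+2] and keeps the one at the smallest position (faster: O(n+m) vs O(n*m)).

-- ===== PORT A =====
-- inner loop of A: first feature value f with f + 2 >= x >= f - 2 (break on first hit)
def scanA (x : Int) : List Int → Option Int
  | [] => none
  | f :: rest => if f + 2 ≥ x ∧ x ≥ f - 2 then some f else scanA x rest

def find_the_portion (imp_index : List Int) (feature_index : List Int) : List Int :=
  imp_index.foldl (fun acc x =>
    match scanA x feature_index with
    | some f => acc ++ [f]
    | none => acc) []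

-- ===== PORT B =====
-- first = {}; for j, v in enumerate(feature_index): if v not in first: first[v] = j
def buildFirst (feature_index : List Int) : PySem.Dict Int Int :=
  (PySem.List.enumerate feature_index).foldl
    (fun d p => if d.contains p.2 then d else d.insert p.2 p.1) PySem.Dict.empty

-- one step of the inner candidate loop of B
def pickStep (d : PySem.Dict Int Int) (best : Option (Int × Int)) (v : Int) : Option (Int × Int) :=
  match d.get? v with
  | none => best
  | some j =>
    match best with
    | none => some (j, v)
    | some (bj, bv) => if j < bj then some (j, v) else some (bj, bv)

def find_the_portion_alt (imp_index : List Int) (feature_index : List Int) : List Int :=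
  let d := buildFirst feature_index
  imp_index.foldl (fun acc x =>
    match [x - 2, x - 1, x, x + 1, x + 2].foldl (pickStep d) none with
    | some (_, v) => acc ++ [v]
    | none => acc) []

-- ===== PRECONDITION & SPEC =====
def Spec_find_the_portion (imp_index : List Int) (feature_index : List Int) (out : List Int) : Prop := out = find_the_portion_alt imp_index feature_index
instance (imp_index : List Int) (feature_index : List Int) (out : List Int) : Decidable (Spec_find_the_portion imp_index feature_index out) := by unfold Spec_find_the_portion; infer_instance

-- ===== CLAIM (what is proved, stated in full; the proofs are below) =====
def Claim_equal_find_the_portion : Prop := ∀ (imp_index : List Int) (feature_index : List Int), Dom_find_the_portion imp_index feature_index → Spec_find_the_portion imp_index feature_index (find_the_portion imp_index feature_index)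

-- ===== LEMMAS AND PROOFS =====

-- abstract lookup: earliest index (as Int) of value v in feat
def idxOf (feat : List Int) (v : Int) : Option Int :=
  (feat.findIdx? (fun w => w == v)).map (fun k => (k : Int))

-- abstract candidate-fold step, parameterised by the lookup function
def pstep (g : Int → Option Int) (best : Option (Int × Int)) (v : Int) : Option (Int × Int) :=
  match g v with
  | none => best
  | some j =>
    match best with
    | none => some (j, v)
    | some (bj, bv) => if j < bj then some (j, v) else some (bj, bv)

lemma buildFirst_aux_get (feat : List Int) :
    ∀ (n : Int) (d : PySem.Dict Int Int) (v : Int),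
    ((PySem.List.enumerate feat n).foldl
      (fun d p => if d.contains p.2 then d else d.insert p.2 p.1) d).get? v =
      match d.get? v with
      | some j => some j
      | none => (feat.findIdx? (fun w => w == v)).map (fun k => (n + (k : Int))) := by
  induction feat with
  | nil =>
    intro n d v
    simp [PySem.List.enumerate_nil]
    cases d.get? v <;> simp
  | cons f rest ih =>
    intro n d v
    rw [PySem.List.enumerate_cons]
    simp only [List.foldl_cons]
    by_cases hc : d.contains f = true
    · rw [if_pos hc, ih]
      rcases hv : d.get? v with _ | j
      · have hvf : v ≠ f := by
          intro h; subst h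
          rw [PySem.Dict.contains_eq_isSome_get?, hv] at hc; simp at hc
        rw [List.findIdx?_cons]
        have : (f == v) = false := by simp [Ne.symm hvf]
        rw [this]
        simp only [if_neg (by simp : ¬ false = true)]
        cases rest.findIdx? (fun w => w == v)
        · simp
        · simp
          omega
      · simp
    · rw [if_neg hc, ih]
      by_cases hvf : v = f
      · subst hvf
        have hnone : d.get? v = none := by
          rw [PySem.Dict.contains_eq_isSome_get?] at hc
          cases h : d.get? v <;> simp [h] at hc ⊢
        rw [PySem.Dict.get?_insert, if_pos rfl, hnone, List.findIdx?_cons]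
        simp
      · rw [PySem.Dict.get?_insert, if_neg hvf]
        rcases hv : d.get? v with _ | j
        · rw [List.findIdx?_cons]
          have : (f == v) = false := by simp [Ne.symm hvf]
          rw [this]
          simp only [if_neg (by simp : ¬ false = true)]
          cases rest.findIdx? (fun w => w == v)
          · simp
          · simp
            omega
        · simp

lemma buildFirst_get (feat : List Int) (v : Int) :
    (buildFirst feat).get? v = idxOf feat v := by
  rw [buildFirst, idxOf, buildFirst_aux_get feat 0 PySem.Dict.empty v]
  simp [PySem.Dict.get?_empty]

lemma pickStep_eq_pstep (feat : List Int) :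
    pickStep (buildFirst feat) = pstep (idxOf feat) := by
  funext best v
  rw [pickStep, pstep, buildFirst_get]

-- fold with all-none lookups keeps best
lemma pfold_none (g : Int → Option Int) :
    ∀ (cs : List Int) (best : Option (Int × Int)),
    (∀ v ∈ cs, g v = none) → cs.foldl (pstep g) best = best := by
  intro cs
  induction cs with
  | nil => intro best _; rfl
  | cons c cs ih =>
    intro best h
    simp only [List.foldl_cons]
    rw [show pstep g best c = best by rw [pstep, h c (by simp)]]
    exact ih best (fun v hv => h v (by simp [hv]))

-- shifting all indices by one commutes with the fold
lemma pfold_shift (g g' : Int → Option Int) :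
    ∀ (cs : List Int) (best : Option (Int × Int)),
    (∀ v ∈ cs, g' v = (g v).map (· + 1)) →
    cs.foldl (pstep g') (best.map (fun p => (p.1 + 1, p.2))) =
      (cs.foldl (pstep g) best).map (fun p => (p.1 + 1, p.2)) := by
  intro cs
  induction cs with
  | nil => intro best _; rfl
  | cons c cs ih =>
    intro best h
    simp only [List.foldl_cons]
    have step : pstep g' (best.map (fun p => (p.1 + 1, p.2))) c =
        (pstep g best c).map (fun p => (p.1 + 1, p.2)) := by
      rw [pstep, pstep, h c (by simp)]
      rcases g c with _ | j
      · simp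
      · rcases best with _ | ⟨bj, bv⟩
        · simp
        · simp only [Option.map_some]
          by_cases hij : j < bj
          · rw [if_pos hij, if_pos (show j + 1 < bj + 1 by omega)]
            simp
          · rw [if_neg hij, if_neg (show ¬ j + 1 < bj + 1 by omega)]
            simp
    rw [step, ih (pstep g best c) (fun v hv => h v (by simp [hv]))]

-- once an index-0 candidate exists and every other candidate has positive index, its value wins
lemma pfold_zero (g : Int → Option Int) (f : Int) :
    ∀ (cs : List Int) (best : Option (Int × Int)),
    f ∈ cs → g f = some 0 → cs.Nodup →
    (∀ v ∈ cs, v ≠ f → ∀ j, g v = some j → 0 < j) →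
    (∀ p, best = some p → 0 < p.1) →
    (cs.foldl (pstep g) best).map Prod.snd = some f := by
  intro cs
  induction cs with
  | nil => intro best h; simp at h
  | cons c cs ih =>
    intro best hmem h0 hnd hpos hbest
    simp only [List.foldl_cons]
    by_cases hcf : c = f
    · subst hcf
      have hstep : pstep g best c = some (0, c) := by
        rw [pstep, h0]
        rcases best with _ | ⟨bj, bv⟩
        · rfl
        · have : 0 < bj := hbest (bj, bv) rfl
          simp [this]
      rw [hstep]
      -- everything after keeps (0, c): all remaining candidates differ from c (Nodup) so have positive index
      have keep : ∀ (l : List Int), (∀ v ∈ l, v ≠ c → ∀ j, g v = some j → 0 < j) → c ∉ l →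
          l.foldl (pstep g) (some (0, c)) = some (0, c) := by
        intro l
        induction l with
        | nil => intro _ _; rfl
        | cons a l ihl =>
          intro hp hnm
          simp only [List.foldl_cons]
          have ha : pstep g (some (0, c)) a = some (0, c) := by
            rw [pstep]
            rcases hg : g a with _ | j
            · rfl
            · have hac : a ≠ c := by intro h; subst h; simp at hnm
              have : 0 < j := hp a (by simp) hac j hg
              simp [show ¬ j < 0 by omega]
          rw [ha]
          exact ihl (fun v hv => hp v (by simp [hv])) (fun h => hnm (by simp [h]))
      rw [keep cs (fun v hv hvc j hg => hpos v (by simp [hv]) hvc j hg)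
        (by simp at hnd; exact hnd.1)]
      rfl
    · have hmem' : f ∈ cs := by
        rcases List.mem_cons.mp hmem with h | h
        · exact absurd h.symm hcf
        · exact h
      apply ih (pstep g best c) hmem' h0 (by simp at hnd; exact hnd.2)
        (fun v hv => hpos v (by simp [hv]))
      intro p hp
      rcases hg : g c with _ | j
      · rw [pstep, hg] at hp; exact hbest p hp
      · have hj : 0 < j := hpos c (by simp) hcf j hg
        rcases best with _ | ⟨bj, bv⟩
        · rw [pstep, hg] at hp
          simp at hp
          simp [← hp, hj]
        · have hb : 0 < bj := hbest (bj, bv) rfl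
          rw [pstep, hg] at hp
          simp only [] at hp
          by_cases hij : j < bj
          · rw [if_pos hij] at hp
            simp at hp
            simp [← hp, hj]
          · rw [if_neg hij] at hp
            simp at hp
            simp [← hp, hb]

lemma cands_nodup (x : Int) : ([x - 2, x - 1, x, x + 1, x + 2] : List Int).Nodup := by
  simp; omega

lemma pick_eq_scan (feat : List Int) (x : Int) :
    (([x - 2, x - 1, x, x + 1, x + 2] : List Int).foldl (pstep (idxOf feat)) none).map Prod.snd
      = scanA x feat := by
  induction feat with
  | nil =>
    rw [pfold_none _ _ none (fun v _ => by simp [idxOf])]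
    rfl
  | cons f rest ih =>
    by_cases hP : f + 2 ≥ x ∧ x ≥ f - 2
    · -- f is a candidate value with index 0
      have hf : f ∈ ([x - 2, x - 1, x, x + 1, x + 2] : List Int) := by
        have : f = x - 2 ∨ f = x - 1 ∨ f = x ∨ f = x + 1 ∨ f = x + 2 := by omega
        simpa using this
      have h0 : idxOf (f :: rest) f = some 0 := by
        simp [idxOf, List.findIdx?_cons]
      rw [pfold_zero (idxOf (f :: rest)) f _ none hf h0 (cands_nodup x) ?_ (by intro p h; simp at h)]
      · rw [scanA, if_pos hP]
      · intro v _ hvf j hg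
        rw [idxOf, List.findIdx?_cons] at hg
        have : (f == v) = false := by simp [Ne.symm hvf]
        rw [this] at hg
        simp only [if_neg (by simp : ¬ false = true)] at hg
        rcases h : rest.findIdx? (fun w => w == v) with _ | k <;> rw [h] at hg <;> simp at hg
        omega
    · -- f matches no candidate: all lookups shift by one
      have hshift : ∀ v ∈ ([x - 2, x - 1, x, x + 1, x + 2] : List Int),
          idxOf (f :: rest) v = (idxOf rest v).map (· + 1) := by
        intro v hv
        have hvf : f ≠ v := by
          intro h; subst h
          simp at hv
          omega
        rw [idxOf, idxOf, List.findIdx?_cons]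
        have : (f == v) = false := by simp [hvf]
        rw [this]
        simp only [if_neg (by simp : ¬ false = true)]
        cases rest.findIdx? (fun w => w == v) <;> simp
      have := pfold_shift (idxOf rest) (idxOf (f :: rest)) [x - 2, x - 1, x, x + 1, x + 2] none hshift
      simp only [Option.map_none] at this
      rw [this, scanA, if_neg hP, ← ih]
      cases ([x - 2, x - 1, x, x + 1, x + 2] : List Int).foldl (pstep (idxOf rest)) none <;> rfl

-- ===== VERDICT (by name: the statement is the Claim_ definition above) =====
theorem find_the_portion_spec : Claim_equal_find_the_portion := by
  intro imp feat _
  unfold Spec_find_the_portion find_the_portion find_the_portion_alt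
  apply PySem.List.foldl_congr_mem
  intro acc x _
  rw [pickStep_eq_pstep]
  have h := pick_eq_scan feat x
  rcases hfold : ([x - 2, x - 1, x, x + 1, x + 2] : List Int).foldl (pstep (idxOf feat)) none
    with _ | ⟨j, v⟩ <;> rw [hfold] at h <;> simp at h <;> rw [← h]
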